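-- pv_equiv track=rewrite | github.com/HarshitTarsariya/Image-Processing-Applications | math_equation_solver/math_equation_solver.py | __isRectangleValid
-- ===== SOURCE A (Python) =====
-- def __isRectangleValid(rects):
--     # Whether the rectangle is valid or not
--     bool_rect = []
--     for r in rects:
--         l = []
--         for rec in rects:
--             flag = 0
--             if rec != r:
--                 # Discard the smaller rectangles and add the maximum rects
--                 if r[0] < (rec[0] + rec[2] + 10) and rec[0] < (r[0] + r[2] + 10) and r[1] < (
--                         rec[1] + rec[3] + 10) and rec[1] < (r[1] + r[3] + 10):
--                     flag = 1
--                 l.append(flag)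
--             if rec == r:
--                 l.append(0)
--         bool_rect.append(l)
--     return bool_rect
-- ===== SOURCE B (Python) =====
-- def __isRectangleValid(rects):
--     # Build the matrix back-to-front: each unordered pair's flag is computed once
--     # and shared between matrix[i][j] and matrix[j][i] (the predicate is symmetric).
--     def _flag(a, b):
--         if a != b and a[0] < b[0] + b[2] + 10 and b[0] < a[0] + a[2] + 10 \
--                 and a[1] < b[1] + b[3] + 10 and b[1] < a[1] + a[3] + 10:
--             return 1
--         return 0
--     mat = []
--     suffix = []
--     for r in reversed(rects):
--         flags = [_flag(r, s) for s in suffix]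
--         mat = [[0] + flags] + [[f] + row for f, row in zip(flags, mat)]
--         suffix = [r] + suffix
--     return mat
-- ===== Notes on version B (the rewrite author's own statement) =====
-- stated objective: alternative
-- what changed: B builds the matrix back-to-front over suffixes: each unordered pair's symmetric flag is computed once and prepended to both the new head row and the head of every existing row (mirror fill), instead of A's full n x n nested rescan.
import Mathlib
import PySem

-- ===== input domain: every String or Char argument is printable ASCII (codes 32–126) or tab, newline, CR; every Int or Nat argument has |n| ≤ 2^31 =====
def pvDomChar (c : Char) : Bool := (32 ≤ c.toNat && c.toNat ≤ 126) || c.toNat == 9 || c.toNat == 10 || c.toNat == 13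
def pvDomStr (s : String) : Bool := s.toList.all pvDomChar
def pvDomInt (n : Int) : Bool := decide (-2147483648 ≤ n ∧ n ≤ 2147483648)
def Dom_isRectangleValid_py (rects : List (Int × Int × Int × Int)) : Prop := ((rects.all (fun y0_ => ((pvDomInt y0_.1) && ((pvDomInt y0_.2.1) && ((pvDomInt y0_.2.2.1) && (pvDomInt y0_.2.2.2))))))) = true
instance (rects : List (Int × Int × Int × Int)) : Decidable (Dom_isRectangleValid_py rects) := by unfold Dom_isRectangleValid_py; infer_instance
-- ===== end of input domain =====

-- B builds the matrix back-to-front over suffixes, computing each symmetric pair flag once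
-- and mirroring it into both positions (objective: alternative decomposition, same cost class).

-- ===== PORT A =====
-- the 10px-margin overlap test, exactly A's condition with A's argument roles
def pvOverlap (r rec : Int × Int × Int × Int) : Bool :=
  decide (r.1 < rec.1 + rec.2.2.1 + 10 ∧ rec.1 < r.1 + r.2.2.1 + 10 ∧
          r.2.1 < rec.2.1 + rec.2.2.2 + 10 ∧ rec.2.1 < r.2.1 + r.2.2.2 + 10)

def isRectangleValid_py (rects : List (Int × Int × Int × Int)) : List (List Int) :=
  rects.foldl (fun bool_rect r =>
    let l := rects.foldl (fun l rec =>
      let flag : Int := 0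
      let l := if rec ≠ r then
          let flag := if pvOverlap r rec then (1 : Int) else flag
          l ++ [flag]
        else l
      if rec = r then l ++ [0] else l) ([] : List Int)
    bool_rect ++ [l]) []

-- ===== PORT B =====
def pvFlag (a b : Int × Int × Int × Int) : Int :=
  if a ≠ b ∧ pvOverlap a b = true then 1 else 0

def isRectangleValid_py_alt (rects : List (Int × Int × Int × Int)) : List (List Int) :=
  (rects.foldr (fun r (st : List (List Int) × List (Int × Int × Int × Int)) =>
    let flags := st.2.map (fun s => pvFlag r s)
    ((0 :: flags) :: List.zipWith (fun f row => f :: row) flags st.1, r :: st.2))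
    ([], [])).1

-- ===== PRECONDITION & SPEC =====
def Spec_isRectangleValid_py (rects : List (Int × Int × Int × Int)) (out : List (List Int)) : Prop := out = isRectangleValid_py_alt rects
instance (rects : List (Int × Int × Int × Int)) (out : List (List Int)) : Decidable (Spec_isRectangleValid_py rects out) := by unfold Spec_isRectangleValid_py; infer_instance

-- ===== CLAIM (what is proved, stated in full; the proofs are below) =====
def Claim_equal_isRectangleValid_py : Prop := ∀ (rects : List (Int × Int × Int × Int)), Dom_isRectangleValid_py rects → Spec_isRectangleValid_py rects (isRectangleValid_py rects)

-- ===== LEMMAS AND PROOFS =====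

-- A's per-cell value
def cellA (r rec : Int × Int × Int × Int) : Int :=
  if rec = r then 0 else if pvOverlap r rec then 1 else 0

theorem pvOverlap_symm (a b : Int × Int × Int × Int) : pvOverlap a b = pvOverlap b a := by
  simp only [pvOverlap, decide_eq_decide]
  tauto

theorem pvFlag_eq_cellA (a b : Int × Int × Int × Int) : pvFlag a b = cellA a b := by
  unfold pvFlag cellA
  by_cases h : b = a
  · subst h; simp
  · have h' : a ≠ b := fun e => h e.symm
    simp [h, h']

theorem pvFlag_eq_cellA_swap (a b : Int × Int × Int × Int) : pvFlag a b = cellA b a := by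
  unfold pvFlag cellA
  by_cases h : a = b
  · subst h; simp
  · simp [h, pvOverlap_symm a b]

theorem innerA_eq (r : Int × Int × Int × Int) (l : List (Int × Int × Int × Int)) :
    ∀ init : List Int,
      l.foldl (fun l rec =>
        let flag : Int := 0
        let l := if rec ≠ r then
            let flag := if pvOverlap r rec then (1 : Int) else flag
            l ++ [flag]
          else l
        if rec = r then l ++ [0] else l) init = init ++ l.map (cellA r) := by
  induction l with
  | nil => intro init; simp
  | cons x xs ih =>
      intro init
      rw [List.foldl_cons, ih]
      by_cases h : x = r <;> simp [cellA, h]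

theorem outerA_eq (rects : List (Int × Int × Int × Int)) :
    isRectangleValid_py rects = rects.map (fun r => rects.map (cellA r)) := by
  unfold isRectangleValid_py
  suffices h : ∀ (l : List (Int × Int × Int × Int)) (init : List (List Int)),
      l.foldl (fun bool_rect r =>
        let l := rects.foldl (fun l rec =>
          let flag : Int := 0
          let l := if rec ≠ r then
              let flag := if pvOverlap r rec then (1 : Int) else flag
              l ++ [flag]
            else l
          if rec = r then l ++ [0] else l) ([] : List Int)
        bool_rect ++ [l]) init = init ++ l.map (fun r => rects.map (cellA r)) by
    simpa using h rects []
  intro l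
  induction l with
  | nil => intro init; simp
  | cons x xs ih =>
      intro init
      rw [List.foldl_cons, ih]
      have h := innerA_eq x rects
      simp only [h]
      simp

theorem zipWith_cons_two_maps {α β : Type} (f : α → β) (g : α → List β) (l : List α) :
    List.zipWith (fun a b => a :: b) (l.map f) (l.map g) = l.map (fun x => f x :: g x) := by
  induction l with
  | nil => rfl
  | cons x xs ih => simp [ih]

theorem altB_eq (rects : List (Int × Int × Int × Int)) :
    rects.foldr (fun r (st : List (List Int) × List (Int × Int × Int × Int)) =>
      let flags := st.2.map (fun s => pvFlag r s)
      ((0 :: flags) :: List.zipWith (fun f row => f :: row) flags st.1, r :: st.2))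
      ([], []) = (rects.map (fun r => rects.map (cellA r)), rects) := by
  induction rects with
  | nil => rfl
  | cons r rest ih =>
      simp only [List.foldr_cons, ih]
      refine Prod.ext ?_ rfl
      simp only [List.map_cons]
      refine (List.cons_eq_cons).mpr ⟨?_, ?_⟩
      · -- head row
        show (0 : Int) :: rest.map (fun s => pvFlag r s) = cellA r r :: rest.map (cellA r)
        rw [show cellA r r = 0 by simp [cellA]]
        congr 1
        exact List.map_congr_left (fun s _ => pvFlag_eq_cellA r s)
      · -- tail rows: zipWith of two maps over the same list
        show List.zipWith (fun f row => f :: row) (rest.map (fun s => pvFlag r s))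
              (rest.map (fun s => rest.map (cellA s)))
            = rest.map (fun s => (r :: rest).map (cellA s))
        rw [zipWith_cons_two_maps]
        exact List.map_congr_left (fun s _ => by rw [pvFlag_eq_cellA_swap r s, List.map_cons])

-- ===== VERDICT (by name: the statement is the Claim_ definition above) =====
theorem isRectangleValid_py_spec : Claim_equal_isRectangleValid_py := by
  intro rects _
  show isRectangleValid_py rects = isRectangleValid_py_alt rects
  rw [outerA_eq]
  unfold isRectangleValid_py_alt
  rw [altB_eq]
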